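-- pv_equiv track=rewrite | github.com/samuelhwilliams/advent-of-code | 2023/day_01.py | part2
-- ===== SOURCE A (Python) =====
-- values = {
--     "1",
--     "2",
--     "3",
--     "4",
--     "5",
--     "6",
--     "7",
--     "8",
--     "9",
--     "0",
--     "one",
--     "two",
--     "three",
--     "four",
--     "five",
--     "six",
--     "seven",
--     "eight",
--     "nine",
-- }
--
-- convert = {
--     "one": "1",
--     "two": "2",
--     "three": "3",
--     "four": "4",
--     "five": "5",
--     "six": "6",
--     "seven": "7",
--     "eight": "8",
--     "nine": "9",
-- }
--
-- def part2(data: list[str]) -> int: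
--     def _yield_values():
--         for line in data:
--             first_seen, latest_seen = None, None
--
--             for i in range(len(line)):
--                 to_check = {
--                     line[i : i + 1],
--                     line[i : i + 2],
--                     line[i : i + 3],
--                     line[i : i + 4],
--                     line[i : i + 5],
--                 }
--                 if match := (values & to_check):
--                     found = match.pop()
--                     if first_seen is None:
--                         first_seen = convert.get(found, found)
--                     latest_seen = convert.get(found, found)
--
--             last_seen = latest_seen
--             yield int(first_seen + last_seen)
--
--     return sum(_yield_values())
-- ===== SOURCE B (Python) =====
-- # B: two early-exit directional scans per line (first match from the left, first
-- # match from the right), matching a token at a position via isdigit/startswith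
-- # instead of A's full-line scan that intersects 5 slices with a 19-element set.
-- convert = {
--     "one": "1",
--     "two": "2",
--     "three": "3",
--     "four": "4",
--     "five": "5",
--     "six": "6",
--     "seven": "7",
--     "eight": "8",
--     "nine": "9",
-- }
--
--
-- def _token_at(line, i):
--     c = line[i]
--     if c.isdigit():
--         return c
--     for word, digit in convert.items():
--         if line.startswith(word, i):
--             return digit
--     return None
--
--
-- def _first_token(line, indices):
--     for i in indices:
--         v = _token_at(line, i)
--         if v is not None:
--             return v
--     return None
--
--
-- def _line_value(line):
--     first = _first_token(line, range(len(line)))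
--     last = _first_token(line, reversed(range(len(line))))
--     return int(first + last)
--
--
-- def part2(data: list[str]) -> int:
--     total = 0
--     for line in data:
--         total += _line_value(line)
--     return total
-- ===== Notes on version B (the rewrite author's own statement) =====
-- stated objective: alternative
-- what changed: A scans every position of each line, intersecting a set of 5 slices with the 19-token set and carrying first/latest state through one full pass; B instead matches a token at a position directly via isdigit/startswith and does two early-exit directional scans (first hit from the left, first hit from the right) per line.
import Mathlib
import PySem

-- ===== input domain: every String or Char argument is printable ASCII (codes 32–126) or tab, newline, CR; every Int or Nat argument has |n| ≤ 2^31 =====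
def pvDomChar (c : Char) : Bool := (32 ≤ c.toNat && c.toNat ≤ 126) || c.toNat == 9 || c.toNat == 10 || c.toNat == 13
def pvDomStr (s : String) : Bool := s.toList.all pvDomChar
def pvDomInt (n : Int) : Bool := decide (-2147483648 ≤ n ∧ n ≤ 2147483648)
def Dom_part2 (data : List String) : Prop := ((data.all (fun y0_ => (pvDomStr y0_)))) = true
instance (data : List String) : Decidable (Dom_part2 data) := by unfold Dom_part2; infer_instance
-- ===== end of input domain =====

-- B replaces A's single full-line scan (intersecting 5 slices with the 19-token set at every
-- position) by two early-exit directional scans with an isdigit/startswith token match.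

-- ===== PORT A =====
-- Python's `values` set, in the source's literal order.  The intersection `values & to_check`
-- below provably has at most one element (no token is a prefix of another token starting at the
-- same position), so the hash-dependent iteration order of the Python set (and `.pop()`) is
-- immaterial.
def pvValues : List String :=
  ["1", "2", "3", "4", "5", "6", "7", "8", "9", "0",
   "one", "two", "three", "four", "five", "six", "seven", "eight", "nine"]

def pvConvert : PySem.Dict String String :=
  PySem.Dict.ofList [("one", "1"), ("two", "2"), ("three", "3"), ("four", "4"),
                     ("five", "5"), ("six", "6"), ("seven", "7"), ("eight", "8"), ("nine", "9")]

-- `values & to_check` at position i, then `.pop()` (a singleton intersection, see above)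
def pvMatchA (line : String) (i : Int) : Option String :=
  let toCheck := [PySem.Str.slice line (some i) (some (i + 1)),
                  PySem.Str.slice line (some i) (some (i + 2)),
                  PySem.Str.slice line (some i) (some (i + 3)),
                  PySem.Str.slice line (some i) (some (i + 4)),
                  PySem.Str.slice line (some i) (some (i + 5))]
  (pvValues.filter (fun v => toCheck.contains v)).head?

-- the body of A's `for i in range(len(line))` loop, on the state (first_seen, latest_seen)
def pvStepA (line : String) (s : Option String × Option String) (i : Int) :
    Option String × Option String :=
  match pvMatchA line i with
  | none => s
  | some found =>
    (match s.1 with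
     | none => some (pvConvert.getD found found)
     | some f => some f,
     some (pvConvert.getD found found))

-- one iteration of `_yield_values`; `int(first_seen + last_seen)` is read on code points by
-- ofChars? (exact for str concatenation + int()); none = the TypeError Python raises when a
-- line has no token (first_seen/latest_seen still None) — those inputs are excluded by Pre_.
def pvLineA (line : String) : Option Int :=
  match (PySem.List.pyRange 0 (PySem.Str.len line) 1).foldl (pvStepA line) (none, none) with
  | (some f, some l) => PySem.Int.ofChars? (f.toList ++ l.toList)
  | _ => none

def part2 (data : List String) : Int :=
  -- sum(_yield_values()); the `none` (TypeError) case never occurs under Pre_part2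
  data.foldl (fun acc line => acc + (pvLineA line).getD 0) 0

-- ===== PORT B =====
-- the `convert` dict of Source B, in insertion order
def pvWords : List (String × String) :=
  [("one", "1"), ("two", "2"), ("three", "3"), ("four", "4"),
   ("five", "5"), ("six", "6"), ("seven", "7"), ("eight", "8"), ("nine", "9")]

-- _token_at(line, i); `line.startswith(word, i)` is a prefix test on the suffix at i
-- (exact here: every caller passes 0 ≤ i, so .toNat does not clamp)
def pvTokenAt (line : String) (i : Int) : Option String :=
  match PySem.Str.pyGet? line i with
  | none => none   -- IndexError: unreachable, every caller passes an in-range i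
  | some c =>
    if PySem.Chars.isdigit c then some (String.ofList [c])
    else pvWords.findSome? (fun wd =>
      if PySem.Chars.startswith (line.toList.drop i.toNat) wd.1.toList then some wd.2 else none)

-- _first_token(line, indices): first index whose token matches, early exit
def pvFirstToken (line : String) (indices : List Int) : Option String :=
  indices.findSome? (pvTokenAt line)

-- _line_value(line); none = the TypeError on a token-free line, excluded by Pre_
def pvLineB (line : String) : Option Int :=
  match pvFirstToken line (PySem.List.pyRange 0 (PySem.Str.len line) 1),
        pvFirstToken line (PySem.List.pyRange 0 (PySem.Str.len line) 1).reverse with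
  | some f, some l => PySem.Int.ofChars? (f.toList ++ l.toList)
  | _, _ => none

def part2_alt (data : List String) : Int :=
  data.foldl (fun acc line => acc + (pvLineB line).getD 0) 0

-- ===== PRECONDITION & SPEC =====
-- Pre_ excludes exactly the inputs containing a line with no digit and no spelled digit,
-- on which the Python A raises TypeError (int(None + None)); B raises there too.
def Pre_part2 (data : List String) : Prop :=
  (data.all (fun line =>
    ["1", "2", "3", "4", "5", "6", "7", "8", "9", "0",
     "one", "two", "three", "four", "five", "six", "seven", "eight", "nine"].any
      (fun v => PySem.Str.isIn v line))) = true
instance (data : List String) : Decidable (Pre_part2 data) := by unfold Pre_part2; infer_instance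

def pvWitness_part2 : List String := ["one2", "xtwone3x"]

def Spec_part2 (data : List String) (out : Int) : Prop := out = part2_alt data
instance (data : List String) (out : Int) : Decidable (Spec_part2 data out) := by unfold Spec_part2; infer_instance

-- ===== CLAIM (what is proved, stated in full; the proofs are below) =====
def Claim_equal_part2 : Prop := ∀ (data : List String), Dom_part2 data → Pre_part2 data → Spec_part2 data (part2 data)

-- ===== LEMMAS AND PROOFS =====

lemma tl_one : ("one" : String).toList = ['o', 'n', 'e'] := by decide

lemma tl_two : ("two" : String).toList = ['t', 'w', 'o'] := by decide

lemma tl_three : ("three" : String).toList = ['t', 'h', 'r', 'e', 'e'] := by decide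

lemma tl_four : ("four" : String).toList = ['f', 'o', 'u', 'r'] := by decide

lemma tl_five : ("five" : String).toList = ['f', 'i', 'v', 'e'] := by decide

lemma tl_six : ("six" : String).toList = ['s', 'i', 'x'] := by decide

lemma tl_seven : ("seven" : String).toList = ['s', 'e', 'v', 'e', 'n'] := by decide

lemma tl_eight : ("eight" : String).toList = ['e', 'i', 'g', 'h', 't'] := by decide

lemma tl_nine : ("nine" : String).toList = ['n', 'i', 'n', 'e'] := by decide
lemma tld_0 : ("0" : String).toList = ['0'] := by decide

lemma tld_1 : ("1" : String).toList = ['1'] := by decide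

lemma tld_2 : ("2" : String).toList = ['2'] := by decide

lemma tld_3 : ("3" : String).toList = ['3'] := by decide

lemma tld_4 : ("4" : String).toList = ['4'] := by decide

lemma tld_5 : ("5" : String).toList = ['5'] := by decide

lemma tld_6 : ("6" : String).toList = ['6'] := by decide

lemma tld_7 : ("7" : String).toList = ['7'] := by decide

lemma tld_8 : ("8" : String).toList = ['8'] := by decide

lemma tld_9 : ("9" : String).toList = ['9'] := by decide

lemma mem_takes_iff (w l : List Char) (h1 : 1 ≤ w.length) (h5 : w.length ≤ 5) :
    (w = l.take 1 ∨ w = l.take 2 ∨ w = l.take 3 ∨ w = l.take 4 ∨ w = l.take 5) ↔ w <+: l := by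
  constructor
  · rintro (rfl | rfl | rfl | rfl | rfl) <;> exact List.take_prefix _ _
  · intro hp
    have ht := List.prefix_iff_eq_take.mp hp
    have hc : w.length = 1 ∨ w.length = 2 ∨ w.length = 3 ∨ w.length = 4 ∨ w.length = 5 := by omega
    rcases hc with h | h | h | h | h <;> rw [h] at ht <;> tauto

lemma matchA_prefix (line : String) (j : Nat) :
    pvMatchA line (j : Int) =
      (pvValues.filter (fun v => decide (v.toList <+: line.toList.drop j))).head? := by
  have hdef : pvMatchA line (j : Int) =
      (pvValues.filter (fun v =>
        [PySem.Str.slice line (some (j:Int)) (some ((j:Int) + 1)),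
         PySem.Str.slice line (some (j:Int)) (some ((j:Int) + 2)),
         PySem.Str.slice line (some (j:Int)) (some ((j:Int) + 3)),
         PySem.Str.slice line (some (j:Int)) (some ((j:Int) + 4)),
         PySem.Str.slice line (some (j:Int)) (some ((j:Int) + 5))].contains v)).head? := rfl
  rw [hdef]
  refine congrArg _ (List.filter_congr ?_)
  intro v hv
  have hslice : ∀ k : Nat,
      (PySem.Str.slice line (some (j : Int)) (some ((j : Int) + (k : Int)))).toList
        = (line.toList.drop j).take k := fun k => by simp [PySem.List.slice_natCast_add]
  have hlen : 1 ≤ v.toList.length ∧ v.toList.length ≤ 5 := by fin_cases hv <;> decide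
  have h1 := hslice 1; have h2 := hslice 2; have h3 := hslice 3
  have h4 := hslice 4; have h5 := hslice 5
  push_cast at h1 h2 h3 h4 h5
  have hv2s : ∀ s : String, (v = s) ↔ (v.toList = s.toList) := fun s => String.toList_inj.symm
  simp only [List.contains_eq_mem, List.mem_cons, List.not_mem_nil, or_false, hv2s, h1, h2, h3, h4, h5]
  exact decide_eq_decide.mpr (mem_takes_iff _ _ hlen.1 hlen.2)

lemma startswith_decide (l w : List Char) : PySem.Chars.startswith l w = decide (w <+: l) := by
  by_cases h : w <+: l
  · simp [PySem.Chars.startswith, h, List.isPrefixOf_iff_prefix]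
  · simp only [PySem.Chars.startswith]
    rw [Bool.eq_iff_iff]
    simp [List.isPrefixOf_iff_prefix, h]

lemma words_head (l : List Char) :
    ((["one", "two", "three", "four", "five", "six", "seven", "eight", "nine"].filter
        (fun v : String => decide (v.toList <+: l))).head?).map (fun f => pvConvert.getD f f)
      = pvWords.findSome? (fun wd =>
          if PySem.Chars.startswith l wd.1.toList then some wd.2 else none) := by
  simp only [pvWords, List.findSome?_cons, startswith_decide,tl_one, tl_two, tl_three, tl_four, tl_five, tl_six, tl_seven, tl_eight, tl_nine]
  by_cases c_one : ['o', 'n', 'e'] <+: l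
  · simp [List.filter_cons, c_one, tl_one, tl_two, tl_three, tl_four, tl_five, tl_six, tl_seven, tl_eight, tl_nine]; decide
  simp only [List.filter_cons, c_one, tl_one, tl_two, tl_three, tl_four, tl_five, tl_six, tl_seven, tl_eight, tl_nine, decide_eq_true_eq, decide_false, Bool.false_eq_true, if_false]
  by_cases c_two : ['t', 'w', 'o'] <+: l
  · simp [List.filter_cons, c_two, tl_one, tl_two, tl_three, tl_four, tl_five, tl_six, tl_seven, tl_eight, tl_nine]; decide
  simp only [List.filter_cons, c_two, tl_one, tl_two, tl_three, tl_four, tl_five, tl_six, tl_seven, tl_eight, tl_nine, decide_eq_true_eq, decide_false, Bool.false_eq_true, if_false]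
  by_cases c_three : ['t', 'h', 'r', 'e', 'e'] <+: l
  · simp [List.filter_cons, c_three, tl_one, tl_two, tl_three, tl_four, tl_five, tl_six, tl_seven, tl_eight, tl_nine]; decide
  simp only [List.filter_cons, c_three, tl_one, tl_two, tl_three, tl_four, tl_five, tl_six, tl_seven, tl_eight, tl_nine, decide_eq_true_eq, decide_false, Bool.false_eq_true, if_false]
  by_cases c_four : ['f', 'o', 'u', 'r'] <+: l
  · simp [List.filter_cons, c_four, tl_one, tl_two, tl_three, tl_four, tl_five, tl_six, tl_seven, tl_eight, tl_nine]; decide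
  simp only [List.filter_cons, c_four, tl_one, tl_two, tl_three, tl_four, tl_five, tl_six, tl_seven, tl_eight, tl_nine, decide_eq_true_eq, decide_false, Bool.false_eq_true, if_false]
  by_cases c_five : ['f', 'i', 'v', 'e'] <+: l
  · simp [List.filter_cons, c_five, tl_one, tl_two, tl_three, tl_four, tl_five, tl_six, tl_seven, tl_eight, tl_nine]; decide
  simp only [List.filter_cons, c_five, tl_one, tl_two, tl_three, tl_four, tl_five, tl_six, tl_seven, tl_eight, tl_nine, decide_eq_true_eq, decide_false, Bool.false_eq_true, if_false]
  by_cases c_six : ['s', 'i', 'x'] <+: l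
  · simp [List.filter_cons, c_six, tl_one, tl_two, tl_three, tl_four, tl_five, tl_six, tl_seven, tl_eight, tl_nine]; decide
  simp only [List.filter_cons, c_six, tl_one, tl_two, tl_three, tl_four, tl_five, tl_six, tl_seven, tl_eight, tl_nine, decide_eq_true_eq, decide_false, Bool.false_eq_true, if_false]
  by_cases c_seven : ['s', 'e', 'v', 'e', 'n'] <+: l
  · simp [List.filter_cons, c_seven, tl_one, tl_two, tl_three, tl_four, tl_five, tl_six, tl_seven, tl_eight, tl_nine]; decide
  simp only [List.filter_cons, c_seven, tl_one, tl_two, tl_three, tl_four, tl_five, tl_six, tl_seven, tl_eight, tl_nine, decide_eq_true_eq, decide_false, Bool.false_eq_true, if_false]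
  by_cases c_eight : ['e', 'i', 'g', 'h', 't'] <+: l
  · simp [List.filter_cons, c_eight, tl_one, tl_two, tl_three, tl_four, tl_five, tl_six, tl_seven, tl_eight, tl_nine]; decide
  simp only [List.filter_cons, c_eight, tl_one, tl_two, tl_three, tl_four, tl_five, tl_six, tl_seven, tl_eight, tl_nine, decide_eq_true_eq, decide_false, Bool.false_eq_true, if_false]
  by_cases c_nine : ['n', 'i', 'n', 'e'] <+: l
  · simp [List.filter_cons, c_nine, tl_one, tl_two, tl_three, tl_four, tl_five, tl_six, tl_seven, tl_eight, tl_nine]; decide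
  simp only [List.filter_cons, c_nine, tl_one, tl_two, tl_three, tl_four, tl_five, tl_six, tl_seven, tl_eight, tl_nine, decide_eq_true_eq, decide_false, Bool.false_eq_true, if_false]
  simp

lemma match_eq (line : String) (j : Nat) (h : j < line.toList.length) :
    (pvMatchA line (j : Int)).map (fun f => pvConvert.getD f f) = pvTokenAt line (j : Int) := by
  rw [matchA_prefix]
  have hdrop : line.toList.drop j = line.toList[j] :: line.toList.drop (j + 1) :=
    List.drop_eq_getElem_cons h
  unfold pvTokenAt
  rw [show PySem.Str.pyGet? line (j : Int) = some line.toList[j] by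
    simp [PySem.List.pyGet?_natCast, List.getElem?_eq_getElem h]]
  rw [show ((j : Int)).toNat = j from Int.toNat_natCast j]
  set c := line.toList[j] with hc
  set rest := line.toList.drop (j + 1) with hr
  rw [hdrop]
  by_cases hd : PySem.Chars.isdigit c
  · simp only [hd, if_true]
    have hb : 48 ≤ c.toNat ∧ c.toNat ≤ 57 := by
      simp [PySem.Chars.isdigit, Char.le_def] at hd; exact ⟨hd.1, hd.2⟩
    have hcases : c.toNat = 48 ∨ c.toNat = 49 ∨ c.toNat = 50 ∨ c.toNat = 51 ∨ c.toNat = 52 ∨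
        c.toNat = 53 ∨ c.toNat = 54 ∨ c.toNat = 55 ∨ c.toNat = 56 ∨ c.toNat = 57 := by omega
    clear_value c
    rcases hcases with hcv | hcv | hcv | hcv | hcv | hcv | hcv | hcv | hcv | hcv
    · have hc : c = '0' := by
        apply Char.ext; exact UInt32.toNat_inj.mp hcv
      subst hc
      simp [pvValues, List.filter_cons, List.cons_prefix_cons, tl_one, tl_two, tl_three, tl_four, tl_five, tl_six, tl_seven, tl_eight, tl_nine]
      decide
    · have hc : c = '1' := by
        apply Char.ext; exact UInt32.toNat_inj.mp hcv
      subst hc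
      simp [pvValues, List.filter_cons, List.cons_prefix_cons, tl_one, tl_two, tl_three, tl_four, tl_five, tl_six, tl_seven, tl_eight, tl_nine]
      decide
    · have hc : c = '2' := by
        apply Char.ext; exact UInt32.toNat_inj.mp hcv
      subst hc
      simp [pvValues, List.filter_cons, List.cons_prefix_cons, tl_one, tl_two, tl_three, tl_four, tl_five, tl_six, tl_seven, tl_eight, tl_nine]
      decide
    · have hc : c = '3' := by
        apply Char.ext; exact UInt32.toNat_inj.mp hcv
      subst hc
      simp [pvValues, List.filter_cons, List.cons_prefix_cons, tl_one, tl_two, tl_three, tl_four, tl_five, tl_six, tl_seven, tl_eight, tl_nine]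
      decide
    · have hc : c = '4' := by
        apply Char.ext; exact UInt32.toNat_inj.mp hcv
      subst hc
      simp [pvValues, List.filter_cons, List.cons_prefix_cons, tl_one, tl_two, tl_three, tl_four, tl_five, tl_six, tl_seven, tl_eight, tl_nine]
      decide
    · have hc : c = '5' := by
        apply Char.ext; exact UInt32.toNat_inj.mp hcv
      subst hc
      simp [pvValues, List.filter_cons, List.cons_prefix_cons, tl_one, tl_two, tl_three, tl_four, tl_five, tl_six, tl_seven, tl_eight, tl_nine]
      decide
    · have hc : c = '6' := by
        apply Char.ext; exact UInt32.toNat_inj.mp hcv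
      subst hc
      simp [pvValues, List.filter_cons, List.cons_prefix_cons, tl_one, tl_two, tl_three, tl_four, tl_five, tl_six, tl_seven, tl_eight, tl_nine]
      decide
    · have hc : c = '7' := by
        apply Char.ext; exact UInt32.toNat_inj.mp hcv
      subst hc
      simp [pvValues, List.filter_cons, List.cons_prefix_cons, tl_one, tl_two, tl_three, tl_four, tl_five, tl_six, tl_seven, tl_eight, tl_nine]
      decide
    · have hc : c = '8' := by
        apply Char.ext; exact UInt32.toNat_inj.mp hcv
      subst hc
      simp [pvValues, List.filter_cons, List.cons_prefix_cons, tl_one, tl_two, tl_three, tl_four, tl_five, tl_six, tl_seven, tl_eight, tl_nine]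
      decide
    · have hc : c = '9' := by
        apply Char.ext; exact UInt32.toNat_inj.mp hcv
      subst hc
      simp [pvValues, List.filter_cons, List.cons_prefix_cons, tl_one, tl_two, tl_three, tl_four, tl_five, tl_six, tl_seven, tl_eight, tl_nine]
      decide
  · simp only [hd, Bool.false_eq_true, if_false]
    have hnd : ¬ (PySem.Chars.isdigit c = true) := hd
    clear_value c rest
    have n1 : ('1' = c) = False := eq_false (fun he => hnd (he ▸ rfl))
    have n2 : ('2' = c) = False := eq_false (fun he => hnd (he ▸ rfl))
    have n3 : ('3' = c) = False := eq_false (fun he => hnd (he ▸ rfl))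
    have n4 : ('4' = c) = False := eq_false (fun he => hnd (he ▸ rfl))
    have n5 : ('5' = c) = False := eq_false (fun he => hnd (he ▸ rfl))
    have n6 : ('6' = c) = False := eq_false (fun he => hnd (he ▸ rfl))
    have n7 : ('7' = c) = False := eq_false (fun he => hnd (he ▸ rfl))
    have n8 : ('8' = c) = False := eq_false (fun he => hnd (he ▸ rfl))
    have n9 : ('9' = c) = False := eq_false (fun he => hnd (he ▸ rfl))
    have n0 : ('0' = c) = False := eq_false (fun he => hnd (he ▸ rfl))
    have f1 : (decide (("1" : String).toList <+: c :: rest)) = false := by simp [tld_1, List.cons_prefix_cons, n1]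
    have f2 : (decide (("2" : String).toList <+: c :: rest)) = false := by simp [tld_2, List.cons_prefix_cons, n2]
    have f3 : (decide (("3" : String).toList <+: c :: rest)) = false := by simp [tld_3, List.cons_prefix_cons, n3]
    have f4 : (decide (("4" : String).toList <+: c :: rest)) = false := by simp [tld_4, List.cons_prefix_cons, n4]
    have f5 : (decide (("5" : String).toList <+: c :: rest)) = false := by simp [tld_5, List.cons_prefix_cons, n5]
    have f6 : (decide (("6" : String).toList <+: c :: rest)) = false := by simp [tld_6, List.cons_prefix_cons, n6]
    have f7 : (decide (("7" : String).toList <+: c :: rest)) = false := by simp [tld_7, List.cons_prefix_cons, n7]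
    have f8 : (decide (("8" : String).toList <+: c :: rest)) = false := by simp [tld_8, List.cons_prefix_cons, n8]
    have f9 : (decide (("9" : String).toList <+: c :: rest)) = false := by simp [tld_9, List.cons_prefix_cons, n9]
    have f0 : (decide (("0" : String).toList <+: c :: rest)) = false := by simp [tld_0, List.cons_prefix_cons, n0]
    have hdig : List.filter (fun v : String => decide (v.toList <+: c :: rest))
        ["1", "2", "3", "4", "5", "6", "7", "8", "9", "0"] = [] := by
      simp only [List.filter_cons, f1, f2, f3, f4, f5, f6, f7, f8, f9, f0, Bool.false_eq_true,
        if_false, List.filter_nil]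
    rw [show pvValues = ["1", "2", "3", "4", "5", "6", "7", "8", "9", "0"] ++
        ["one", "two", "three", "four", "five", "six", "seven", "eight", "nine"] from rfl,
      List.filter_append, hdig, List.nil_append]
    exact words_head (c :: rest)

lemma findSome?_congr_mem {α β : Type} (l : List α) (f g : α → Option β)
    (h : ∀ a ∈ l, f a = g a) : l.findSome? f = l.findSome? g := by
  induction l with
  | nil => rfl
  | cons a t ih =>
    simp only [List.findSome?_cons, h a (List.mem_cons_self),
      ih (fun x hx => h x (List.mem_cons_of_mem a hx))]

lemma foldl_stepA (line : String) (I : List Int) (a b : Option String) :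
    I.foldl (pvStepA line) (a, b)
      = ((match a with
          | none => I.findSome? (fun i => (pvMatchA line i).map (fun f => pvConvert.getD f f))
          | some f => some f),
         (match I.reverse.findSome?
              (fun i => (pvMatchA line i).map (fun f => pvConvert.getD f f)) with
          | none => b
          | some d => some d)) := by
  induction I generalizing a b with
  | nil => cases a <;> cases b <;> rfl
  | cons i I ih =>
    simp only [List.foldl_cons, List.reverse_cons]
    rw [show pvStepA line (a, b) i
        = (match pvMatchA line i with
           | none => (a, b)
           | some found =>
             (match a with
              | none => some (pvConvert.getD found found)
              | some f => some f,
              some (pvConvert.getD found found))) from rfl]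
    cases h : pvMatchA line i with
    | none =>
      simp only [h]
      rw [ih, List.findSome?_cons, List.findSome?_append, h]
      cases a <;> cases b <;> simp [List.findSome?, h, Option.map]
    | some d =>
      simp only [h]
      rw [ih, List.findSome?_cons, List.findSome?_append, h]
      cases a <;>
        cases hr : List.findSome?
          (fun i => (pvMatchA line i).map (fun f => pvConvert.getD f f)) I.reverse <;>
        simp [List.findSome?, h, Option.map]

lemma line_eq (line : String) : pvLineA line = pvLineB line := by
  unfold pvLineA pvLineB pvFirstToken
  rw [foldl_stepA]
  have hm : ∀ i ∈ PySem.List.pyRange 0 (PySem.Str.len line) 1,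
      (pvMatchA line i).map (fun f => pvConvert.getD f f) = pvTokenAt line i := by
    intro i hi
    rw [PySem.List.mem_pyRange_one] at hi
    rw [show i = ((i.toNat : Nat) : Int) from (Int.toNat_of_nonneg hi.1).symm]
    apply match_eq
    have hlen : (PySem.Str.len line) = (line.toList.length : Int) := by
      simp [PySem.Str.len_eq]
    omega
  rw [findSome?_congr_mem _ _ _ hm,
    findSome?_congr_mem _ _ _ (fun i hi => hm i (List.mem_reverse.mp hi))]
  cases hf : (PySem.List.pyRange 0 (PySem.Str.len line) 1).findSome? (pvTokenAt line) <;>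
    cases hr : (PySem.List.pyRange 0 (PySem.Str.len line) 1).reverse.findSome? (pvTokenAt line) <;>
      rfl

-- ===== VERDICT (by name: the statement is the Claim_ definition above) =====
theorem part2_spec : Claim_equal_part2 := by
  intro data _ _
  unfold Spec_part2 part2 part2_alt
  rw [show (fun (acc : Int) line => acc + (pvLineA line).getD 0)
      = (fun (acc : Int) line => acc + (pvLineB line).getD 0) by
    funext acc line; rw [line_eq]]
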